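-- pv_equiv track=rewrite | github.com/jhautbois/maqueen-plus-v3-micropython | src/obstacle_avoidance_visual.py | calculate_zones
-- ===== SOURCE A (Python) =====
-- def calculate_zones(points):
--     """Calculate 5 navigation zones from LIDAR points
--     Returns dict with zone distances
--     """
--     zones = {
--         'far_left': [],
--         'left': [],
--         'center': [],
--         'right': [],
--         'far_right': []
--     }
--
--     for (x, y), dist in points.items():
--         if dist >= 4000:
--             continue  # Skip invalid readings
--
--         # Categorize by x coordinate
--         if x <= 1:
--             zones['far_left'].append(dist)
--         elif x <= 2:
--             zones['left'].append(dist)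
--         elif x <= 4:
--             zones['center'].append(dist)
--         elif x <= 5:
--             zones['right'].append(dist)
--         else:
--             zones['far_right'].append(dist)
--
--     # Calculate averages
--     result = {}
--     for zone, dists in zones.items():
--         if dists:
--             result[zone] = sum(dists) // len(dists)
--         else:
--             result[zone] = 4000
--
--     return result
-- ===== SOURCE B (Python) =====
-- def calculate_zones(points):
--     """Zone-major decomposition: one filtering pass per zone over the point
--     cloud, collecting that zone's valid distances by its x-interval, then
--     averaging — no bucketing dispatch at all."""
--     bounds = [('far_left', None, 1), ('left', 1, 2), ('center', 2, 4),
--               ('right', 4, 5), ('far_right', 5, None)]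
--     result = {}
--     for name, lo, hi in bounds:
--         vals = [d for (x, y), d in points.items()
--                 if d < 4000
--                 and (lo is None or lo < x)
--                 and (hi is None or x <= hi)]
--         result[name] = sum(vals) // len(vals) if vals else 4000
--     return result
-- ===== Notes on version B (the rewrite author's own statement) =====
-- stated objective: alternative
-- what changed: Inverts the traversal: instead of one point-major pass dispatching each point into per-zone buckets via an if-elif chain, B does one filtering pass per zone, selecting that zone's valid distances by its x-interval bounds and averaging them directly.
import Mathlib
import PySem

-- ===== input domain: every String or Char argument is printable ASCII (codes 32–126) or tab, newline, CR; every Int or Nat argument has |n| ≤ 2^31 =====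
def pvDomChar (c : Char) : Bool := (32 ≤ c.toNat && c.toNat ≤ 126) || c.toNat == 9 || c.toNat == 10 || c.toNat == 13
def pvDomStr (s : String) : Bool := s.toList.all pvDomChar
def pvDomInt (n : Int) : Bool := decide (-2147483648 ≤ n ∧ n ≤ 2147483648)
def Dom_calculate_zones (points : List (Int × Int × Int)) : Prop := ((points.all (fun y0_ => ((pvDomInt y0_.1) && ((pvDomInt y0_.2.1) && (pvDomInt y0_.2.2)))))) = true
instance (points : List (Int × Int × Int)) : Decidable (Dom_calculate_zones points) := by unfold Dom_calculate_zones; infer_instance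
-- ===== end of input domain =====

-- B inverts the traversal: one filtering pass per zone (selected by its x-interval)
-- instead of A's single point-major pass dispatching into buckets (objective: alternative).

-- ===== PORT A =====
-- A's `zones` dict has five fixed string keys; ported as a 5-tuple of lists in key order.
def pvStepA (z : List Int × List Int × List Int × List Int × List Int) (p : Int × Int × Int) :
    List Int × List Int × List Int × List Int × List Int :=
  let (x, _y, dist) := p
  if dist ≥ 4000 then z            -- skip invalid readings
  else if x ≤ 1 then (z.1 ++ [dist], z.2.1, z.2.2.1, z.2.2.2.1, z.2.2.2.2)
  else if x ≤ 2 then (z.1, z.2.1 ++ [dist], z.2.2.1, z.2.2.2.1, z.2.2.2.2)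
  else if x ≤ 4 then (z.1, z.2.1, z.2.2.1 ++ [dist], z.2.2.2.1, z.2.2.2.2)
  else if x ≤ 5 then (z.1, z.2.1, z.2.2.1, z.2.2.2.1 ++ [dist], z.2.2.2.2)
  else (z.1, z.2.1, z.2.2.1, z.2.2.2.1, z.2.2.2.2 ++ [dist])

-- `sum(dists) // len(dists)` if the list is non-empty, else 4000
def pvAvgA (dists : List Int) : Int :=
  if dists ≠ [] then PySem.Int.floordiv dists.sum (dists.length : Int) else 4000

def calculate_zones (points : List (Int × Int × Int)) : List (String × Int) :=
  let zones := points.foldl pvStepA ([], [], [], [], [])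
  [("far_left", pvAvgA zones.1), ("left", pvAvgA zones.2.1), ("center", pvAvgA zones.2.2.1),
   ("right", pvAvgA zones.2.2.2.1), ("far_right", pvAvgA zones.2.2.2.2)]

-- ===== PORT B =====
-- `(lo is None or lo < x) and (hi is None or x <= hi)`
def pvIn (lo hi : Option Int) (x : Int) : Bool :=
  (match lo with | none => true | some l => decide (l < x)) &&
  (match hi with | none => true | some h => decide (x ≤ h))

-- the list comprehension: this zone's valid distances
def pvZoneVals (points : List (Int × Int × Int)) (lo hi : Option Int) : List Int :=
  (points.filter (fun p => decide (p.2.2 < 4000) && pvIn lo hi p.1)).map (fun p => p.2.2)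

-- `sum(vals) // len(vals) if vals else 4000`
def pvZoneAvg (points : List (Int × Int × Int)) (lo hi : Option Int) : Int :=
  let vals := pvZoneVals points lo hi
  if vals ≠ [] then PySem.Int.floordiv vals.sum (vals.length : Int) else 4000

def calculate_zones_alt (points : List (Int × Int × Int)) : List (String × Int) :=
  [("far_left", pvZoneAvg points none (some 1)),
   ("left", pvZoneAvg points (some 1) (some 2)),
   ("center", pvZoneAvg points (some 2) (some 4)),
   ("right", pvZoneAvg points (some 4) (some 5)),
   ("far_right", pvZoneAvg points (some 5) none)]

-- ===== PRECONDITION & SPEC =====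
def Spec_calculate_zones (points : List (Int × Int × Int)) (out : List (String × Int)) : Prop := out = calculate_zones_alt points
instance (points : List (Int × Int × Int)) (out : List (String × Int)) : Decidable (Spec_calculate_zones points out) := by unfold Spec_calculate_zones; infer_instance

-- ===== CLAIM (what is proved, stated in full; the proofs are below) =====
def Claim_equal_calculate_zones : Prop := ∀ (points : List (Int × Int × Int)), Dom_calculate_zones points → Spec_calculate_zones points (calculate_zones points)

-- ===== LEMMAS AND PROOFS =====

-- A's fold accumulates, per zone, exactly B's filtered value list
set_option maxHeartbeats 2000000 in
theorem pv_fold (points : List (Int × Int × Int))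
    (z : List Int × List Int × List Int × List Int × List Int) :
    points.foldl pvStepA z =
      (z.1 ++ pvZoneVals points none (some 1),
       z.2.1 ++ pvZoneVals points (some 1) (some 2),
       z.2.2.1 ++ pvZoneVals points (some 2) (some 4),
       z.2.2.2.1 ++ pvZoneVals points (some 4) (some 5),
       z.2.2.2.2 ++ pvZoneVals points (some 5) none) := by
  induction points generalizing z with
  | nil => simp [pvZoneVals]
  | cons p ps ih =>
    obtain ⟨x, y, d⟩ := p
    simp only [List.foldl_cons, ih]
    simp only [pvStepA, pvZoneVals, pvIn, List.filter_cons]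
    by_cases h1 : d ≥ 4000 <;> by_cases h2 : x ≤ 1 <;> by_cases h3 : x ≤ 2 <;>
      by_cases h4 : x ≤ 4 <;> by_cases h5 : x ≤ 5 <;>
      simp_all <;> (try split_ifs) <;> first | rfl | omega | simp_all

-- ===== VERDICT (by name: the statement is the Claim_ definition above) =====
theorem calculate_zones_spec : Claim_equal_calculate_zones := by
  intro points _
  show _ = calculate_zones_alt points
  unfold calculate_zones calculate_zones_alt
  simp only [pv_fold points ([], [], [], [], []), List.nil_append, pvZoneAvg, pvAvgA]
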